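-- pv_equiv track=rewrite | github.com/habeelali/frontier-flow-ros2 | frontier_explorer/frontier_explorer_node.py | _build_frontier_mask
-- ===== SOURCE A (Python) =====
-- UNKNOWN = -1
--
-- def _build_frontier_mask(data, w, h, free_thresh):
--     """Return a set of linear indices that are frontier cells.
--
--     Frontier cell: 0 <= data[idx] < free_thresh (i.e. "free") and
--     at least one cell within 2 cells is UNKNOWN (-1).
--
--     Cartographer places an occupied border between free and unknown,
--     so we must look past that 1-2 cell thick wall.
--     """
--     # Precompute offsets for a 5x5 search window (radius 2)
--     search_offsets = []
--     for sy in range(-2, 3):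
--         for sx in range(-2, 3):
--             if sx == 0 and sy == 0:
--                 continue
--             search_offsets.append((sx, sy))
--
--     frontiers = set()
--     for y in range(h):
--         row_base = y * w
--         for x in range(w):
--             idx = row_base + x
--             val = data[idx]
--             if val < 0 or val >= free_thresh:
--                 continue
--             # Check within 2-cell radius for unknown
--             for dx, dy in search_offsets:
--                 nx, ny = x + dx, y + dy
--                 if 0 <= nx < w and 0 <= ny < h:
--                     if data[ny * w + nx] == UNKNOWN:
--                         frontiers.add(idx)
--                         break
--     return frontiers
-- ===== SOURCE B (Python) =====
-- UNKNOWN = -1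
--
-- def _build_frontier_mask(data, w, h, free_thresh):
--     """Separable 5x5 dilation: horizontal pass, then vertical pass, then filter
--     free cells -- instead of scanning 24 offsets around every cell."""
--     n = w * h if w > 0 and h > 0 else 0
--     # H[y*w+x]: some UNKNOWN in this row within 2 columns of x
--     H = [any(data[y * w + c] == UNKNOWN for c in range(max(x - 2, 0), min(x + 3, w)))
--          for y in range(h) for x in range(w)]
--     # V[y*w+x]: some H set in this column within 2 rows of y
--     V = [any(H[r * w + x] for r in range(max(y - 2, 0), min(y + 3, h)))
--          for y in range(h) for x in range(w)]
--     return {i for i in range(n) if 0 <= data[i] < free_thresh and V[i]}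
-- ===== Notes on version B (the rewrite author's own statement) =====
-- stated objective: alternative
-- what changed: Replaces A's per-cell scan over 24 precomputed 5x5 offsets (with early break) by a separable dilation: a horizontal pass marking cells with an UNKNOWN within 2 columns, a vertical pass dilating that mask by 2 rows, and a single final filter over the free cells.
import Mathlib
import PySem

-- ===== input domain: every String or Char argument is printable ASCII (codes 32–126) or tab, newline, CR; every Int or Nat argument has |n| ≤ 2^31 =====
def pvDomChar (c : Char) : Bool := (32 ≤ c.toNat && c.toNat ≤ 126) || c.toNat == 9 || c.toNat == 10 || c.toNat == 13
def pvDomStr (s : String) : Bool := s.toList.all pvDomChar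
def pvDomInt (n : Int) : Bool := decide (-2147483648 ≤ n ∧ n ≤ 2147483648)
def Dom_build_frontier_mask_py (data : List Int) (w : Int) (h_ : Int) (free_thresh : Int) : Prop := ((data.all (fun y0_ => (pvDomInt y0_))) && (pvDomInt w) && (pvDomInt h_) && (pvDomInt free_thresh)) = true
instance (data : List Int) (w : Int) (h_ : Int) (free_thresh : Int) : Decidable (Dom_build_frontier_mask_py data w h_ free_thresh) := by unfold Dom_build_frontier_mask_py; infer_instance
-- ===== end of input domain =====

-- B replaces A's 24-offset scan around every cell by a separable 5×5 dilation (a horizontal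
-- pass, a vertical pass, then one filter over the free cells); alternative algorithm.

-- ===== PORT A =====
-- the offsets of the 5x5 window minus the centre, in Python's construction order
def pvOffsets : List (Int × Int) :=
  (PySem.List.pyRange (-2) 3 1).foldl (fun acc sy =>
    (PySem.List.pyRange (-2) 3 1).foldl (fun acc2 sx =>
      if sx = 0 ∧ sy = 0 then acc2 else acc2 ++ [(sx, sy)]) acc) []

-- the inner 'for dx, dy in search_offsets: … break' loop of A
def pvScanA (data : List Int) (w h_ : Int) (x y idx : Int) :
    List (Int × Int) → PySem.Set Int → PySem.Set Int
  | [], s => s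
  | (dx, dy) :: rest, s =>
      if 0 ≤ x + dx ∧ x + dx < w ∧ 0 ≤ y + dy ∧ y + dy < h_ then
        if PySem.List.pyGetD data ((y + dy) * w + (x + dx)) 0 = -1 then PySem.Set.add s idx
        else pvScanA data w h_ x y idx rest s
      else pvScanA data w h_ x y idx rest s

def build_frontier_mask_py (data : List Int) (w : Int) (h_ : Int) (free_thresh : Int) : List Int :=
  (PySem.List.pyRange 0 h_ 1).foldl (fun fr y =>
    (PySem.List.pyRange 0 w 1).foldl (fun fr2 x =>
      if PySem.List.pyGetD data (y * w + x) 0 < 0 ∨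
          free_thresh ≤ PySem.List.pyGetD data (y * w + x) 0 then fr2
      else pvScanA data w h_ x y (y * w + x) pvOffsets fr2) fr) PySem.Set.empty

-- ===== PORT B =====
-- H[y*w+x]: some UNKNOWN in row y within 2 columns of x
def pvRowHit (data : List Int) (w y x : Int) : Bool :=
  (PySem.List.pyRange (max (x - 2) 0) (min (x + 3) w) 1).any
    (fun c => PySem.List.pyGetD data (y * w + c) 0 == -1)

def pvH (data : List Int) (w h_ : Int) : List Bool :=
  (PySem.List.pyRange 0 h_ 1).flatMap (fun y =>
    (PySem.List.pyRange 0 w 1).map (fun x => pvRowHit data w y x))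

-- V[y*w+x]: some H set in column x within 2 rows of y
def pvColHit (H : List Bool) (w h_ y x : Int) : Bool :=
  (PySem.List.pyRange (max (y - 2) 0) (min (y + 3) h_) 1).any
    (fun r => PySem.List.pyGetD H (r * w + x) false)

def pvV (data : List Int) (w h_ : Int) : List Bool :=
  (PySem.List.pyRange 0 h_ 1).flatMap (fun y =>
    (PySem.List.pyRange 0 w 1).map (fun x => pvColHit (pvH data w h_) w h_ y x))

def build_frontier_mask_py_alt (data : List Int) (w : Int) (h_ : Int) (free_thresh : Int) : List Int :=
  (PySem.List.pyRange 0 (if 0 < w ∧ 0 < h_ then w * h_ else 0) 1).foldl (fun s i =>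
    if 0 ≤ PySem.List.pyGetD data i 0 ∧ PySem.List.pyGetD data i 0 < free_thresh ∧
        PySem.List.pyGetD (pvV data w h_) i false = true then PySem.Set.add s i
    else s) PySem.Set.empty

-- ===== PRECONDITION & SPEC =====
-- Pre_ excludes exactly the inputs where Python A raises IndexError: a non-empty grid
-- (w > 0 and h > 0) with more cells w*h than len(data).
def Pre_build_frontier_mask_py (data : List Int) (w : Int) (h_ : Int) (free_thresh : Int) : Prop :=
  (0 < w ∧ 0 < h_) → h_ * w ≤ (data.length : Int)
instance (data : List Int) (w : Int) (h_ : Int) (free_thresh : Int) : Decidable (Pre_build_frontier_mask_py data w h_ free_thresh) := by unfold Pre_build_frontier_mask_py; infer_instance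

def pvWitness_build_frontier_mask_py : List Int × Int × Int × Int := ([0, -1, 0, 0], 2, 2, 50)

def Spec_build_frontier_mask_py (data : List Int) (w : Int) (h_ : Int) (free_thresh : Int) (out : List Int) : Prop := out = build_frontier_mask_py_alt data w h_ free_thresh
instance (data : List Int) (w : Int) (h_ : Int) (free_thresh : Int) (out : List Int) : Decidable (Spec_build_frontier_mask_py data w h_ free_thresh out) := by unfold Spec_build_frontier_mask_py; infer_instance

-- ===== CLAIM (what is proved, stated in full; the proofs are below) =====
def Claim_equal_build_frontier_mask_py : Prop := ∀ (data : List Int) (w : Int) (h_ : Int) (free_thresh : Int), Dom_build_frontier_mask_py data w h_ free_thresh → Pre_build_frontier_mask_py data w h_ free_thresh → Spec_build_frontier_mask_py data w h_ free_thresh (build_frontier_mask_py data w h_ free_thresh)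

-- ===== LEMMAS AND PROOFS =====

-- the bounds-and-unknown test A applies to one offset
def pvHitB (data : List Int) (w h_ x y : Int) (p : Int × Int) : Bool :=
  decide (0 ≤ x + p.1 ∧ x + p.1 < w ∧ 0 ≤ y + p.2 ∧ y + p.2 < h_) &&
  decide (PySem.List.pyGetD data ((y + p.2) * w + (x + p.1)) 0 = -1)

-- A's per-cell decision as a Bool
def pvCondA (data : List Int) (w h_ ft y x : Int) : Bool :=
  !decide (PySem.List.pyGetD data (y * w + x) 0 < 0 ∨ ft ≤ PySem.List.pyGetD data (y * w + x) 0) &&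
  pvOffsets.any (pvHitB data w h_ x y)

-- B's per-cell decision as a Bool
def pvCondB (data : List Int) (w h_ ft i : Int) : Bool :=
  decide (0 ≤ PySem.List.pyGetD data i 0 ∧ PySem.List.pyGetD data i 0 < ft ∧
          PySem.List.pyGetD (pvV data w h_) i false = true)

set_option maxHeartbeats 2000000 in
lemma pvOffsets_eq : pvOffsets = [(-2,-2),(-1,-2),(0,-2),(1,-2),(2,-2),(-2,-1),(-1,-1),(0,-1),(1,-1),(2,-1),(-2,0),(-1,0),(1,0),(2,0),(-2,1),(-1,1),(0,1),(1,1),(2,1),(-2,2),(-1,2),(0,2),(1,2),(2,2)] := by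
  have h : PySem.List.pyRange (-2) 3 1 = [-2, -1, 0, 1, 2] := by rfl
  simp [pvOffsets, h]

set_option maxHeartbeats 2000000 in
lemma mem_pvOffsets (dx dy : Int) :
    ((dx, dy) ∈ pvOffsets) ↔ (-2 ≤ dx ∧ dx ≤ 2 ∧ -2 ≤ dy ∧ dy ≤ 2 ∧ ¬(dx = 0 ∧ dy = 0)) := by
  constructor
  · intro h
    rw [pvOffsets_eq] at h
    simp [Prod.ext_iff] at h
    omega
  · rintro ⟨h1, h2, h3, h4, h5⟩
    rw [pvOffsets_eq]
    interval_cases dx <;> interval_cases dy <;> first | decide | exact absurd ⟨rfl, rfl⟩ h5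

lemma pvScanA_eq (data : List Int) (w h_ x y idx : Int) (offs : List (Int × Int)) (s : PySem.Set Int) :
    pvScanA data w h_ x y idx offs s =
      if offs.any (pvHitB data w h_ x y) then PySem.Set.add s idx else s := by
  induction offs with
  | nil => simp [pvScanA]
  | cons p rest ih =>
    obtain ⟨dx, dy⟩ := p
    by_cases hb : 0 ≤ x + dx ∧ x + dx < w ∧ 0 ≤ y + dy ∧ y + dy < h_
    · by_cases hu : PySem.List.pyGetD data ((y + dy) * w + (x + dx)) 0 = -1
      · have hp : pvHitB data w h_ x y (dx, dy) = true := by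
          simp only [pvHitB]; rw [decide_eq_true hb, decide_eq_true hu]; rfl
        simp [pvScanA, hb, hu, List.any_cons, hp]
      · have hp : pvHitB data w h_ x y (dx, dy) = false := by
          simp only [pvHitB]; rw [decide_eq_false hu]; simp
        simp [pvScanA, hb, hu, List.any_cons, ih]
        simp only [hp, Bool.false_or]
    · have hp : pvHitB data w h_ x y (dx, dy) = false := by
        simp only [pvHitB]; rw [decide_eq_false hb]; simp
      simp [pvScanA, hb, List.any_cons, ih]
      simp only [hp, Bool.false_or]

lemma pvFoldlAddIf {α : Type} (g : α → Int) (c : α → Bool) :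
    ∀ (l : List α) (s : PySem.Set Int), (∀ p ∈ l, g p ∉ s) → l.Pairwise (fun p q => g p ≠ g q) →
      l.foldl (fun s p => if c p then PySem.Set.add s (g p) else s) s = s ++ (l.filter c).map g := by
  intro l
  induction l with
  | nil => intro s _ _; simp
  | cons p l ih =>
    intro s hs hpw
    rw [List.pairwise_cons] at hpw
    simp only [List.foldl_cons]
    by_cases hc : c p = true
    · have hmem : g p ∉ s := hs p List.mem_cons_self
      have hadd : PySem.Set.add s (g p) = s ++ [g p] := by
        simp [PySem.Set.add, hmem]
      rw [if_pos hc, hadd, ih (s ++ [g p]) ?_ hpw.2]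
      · simp [hc]
      · intro q hq
        simp only [List.mem_append, List.mem_singleton]
        rintro (h | h)
        · exact hs q (List.mem_cons_of_mem _ hq) h
        · exact hpw.1 q hq h.symm
    · rw [if_neg hc, ih s (fun q hq => hs q (List.mem_cons_of_mem _ hq)) hpw.2]
      simp [hc]

lemma pvFoldlAddIf' {α : Type} (g : α → Int) (c : α → Prop) [DecidablePred c] :
    ∀ (l : List α) (s : PySem.Set Int), (∀ p ∈ l, g p ∉ s) → l.Pairwise (fun p q => g p ≠ g q) →
      l.foldl (fun s p => if c p then PySem.Set.add s (g p) else s) s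
        = s ++ (l.filter (fun p => decide (c p))).map g := by
  intro l s hs hpw
  have hsame : (fun (s : PySem.Set Int) (p : α) => if c p then PySem.Set.add s (g p) else s)
      = (fun s p => if (fun q => decide (c q)) p then PySem.Set.add s (g p) else s) := by
    funext s p
    by_cases hp : c p <;> simp [hp]
  rw [hsame]
  exact pvFoldlAddIf g (fun q => decide (c q)) l s hs hpw

lemma pvFoldlFoldl {α β σ : Type} (f : σ → α → β → σ) (ys : List α) (xs : α → List β) (s : σ) :
    ys.foldl (fun s y => (xs y).foldl (fun s x => f s y x) s) s
      = (ys.flatMap (fun y => (xs y).map (fun x => (y, x)))).foldl (fun s p => f s p.1 p.2) s := by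
  induction ys generalizing s with
  | nil => simp
  | cons y ys ih => simp [List.flatMap_cons, List.foldl_append, List.foldl_map, ih]

lemma pvGridEq {α : Type} (W H : Nat) (f : Int → Int → α) :
    (List.range H).flatMap (fun (Y : Nat) => (List.range W).map (fun (X : Nat) => f (↑Y) (↑X)))
      = (List.range (H * W)).map (fun (k : Nat) => f (↑(k / W)) (↑(k % W))) := by
  rcases Nat.eq_zero_or_pos W with hW | hW
  · subst hW; simp
  · induction H with
    | zero => simp
    | succ H ih =>
      rw [List.range_succ, List.flatMap_append, ih, Nat.succ_mul, List.range_add, List.map_append]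
      congr 1
      simp only [List.flatMap_cons, List.flatMap_nil, List.append_nil, List.map_map]
      apply List.map_congr_left
      intro X hX
      rw [List.mem_range] at hX
      have h1 : (H * W + X) / W = X / W + H := by
        rw [Nat.add_comm, Nat.add_mul_div_right _ _ hW]
      have h2 : (H * W + X) % W = X := by
        rw [Nat.add_comm, Nat.add_mul_mod_self_right, Nat.mod_eq_of_lt hX]
      simp [Function.comp, h1, h2, Nat.div_eq_of_lt hX]

lemma pvGridGet {α : Type} (f : Nat → α) (W H : Nat) (hW : 0 < W) (y x : Int)
    (hy0 : 0 ≤ y) (hyH : y < (H : Int)) (hx0 : 0 ≤ x) (hxW : x < (W : Int)) (d : α) :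
    PySem.List.pyGetD ((List.range (H * W)).map f) (y * (W : Int) + x) d
      = f (y.toNat * W + x.toNat) := by
  have hk : y * (W : Int) + x = ((y.toNat * W + x.toNat : Nat) : Int) := by
    push_cast
    rw [Int.toNat_of_nonneg hy0, Int.toNat_of_nonneg hx0]
  rw [hk, PySem.List.pyGetD_natCast]
  have hy' : y.toNat < H := by omega
  have hx' : x.toNat < W := by omega
  have hlt : y.toNat * W + x.toNat < H * W := by
    calc y.toNat * W + x.toNat < y.toNat * W + W := by omega
      _ = (y.toNat + 1) * W := by ring
      _ ≤ H * W := Nat.mul_le_mul_right W hy'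
  exact PySem.List.getD_map_range f (H * W) _ d hlt

lemma pvGridGet' {α : Type} (g : Int → Int → α) (W H : Nat) (hW : 0 < W) (y x : Int)
    (hy0 : 0 ≤ y) (hyH : y < (H : Int)) (hx0 : 0 ≤ x) (hxW : x < (W : Int)) (d : α) :
    PySem.List.pyGetD ((List.range (H * W)).map (fun (k : Nat) => g (↑(k / W)) (↑(k % W))))
        (y * (W : Int) + x) d = g y x := by
  rw [pvGridGet _ W H hW y x hy0 hyH hx0 hxW d]
  have hx' : x.toNat < W := by omega
  have h1 : (y.toNat * W + x.toNat) / W = y.toNat := by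
    rw [Nat.add_comm, Nat.add_mul_div_right _ _ hW, Nat.div_eq_of_lt hx']
    omega
  have h2 : (y.toNat * W + x.toNat) % W = x.toNat := by
    rw [Nat.add_comm, Nat.add_mul_mod_self_right, Nat.mod_eq_of_lt hx']
  rw [h1, h2, Int.toNat_of_nonneg hy0, Int.toNat_of_nonneg hx0]

lemma pvH_eq (data : List Int) (W H : Nat) :
    pvH data (W : Int) (H : Int)
      = (List.range (H * W)).map (fun (k : Nat) => pvRowHit data (W : Int) (↑(k / W)) (↑(k % W))) := by
  unfold pvH
  rw [PySem.List.pyRange_zero_natCast, PySem.List.pyRange_zero_natCast]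
  rw [List.flatMap_map]
  simp only [List.map_map]
  exact pvGridEq W H (fun y x => pvRowHit data (W : Int) y x)

lemma pvV_eq (data : List Int) (W H : Nat) :
    pvV data (W : Int) (H : Int)
      = (List.range (H * W)).map (fun (k : Nat) =>
          pvColHit (pvH data (W : Int) (H : Int)) (W : Int) (H : Int) (↑(k / W)) (↑(k % W))) := by
  unfold pvV
  rw [PySem.List.pyRange_zero_natCast, PySem.List.pyRange_zero_natCast]
  rw [List.flatMap_map]
  simp only [List.map_map]
  exact pvGridEq W H (fun y x => pvColHit (pvH data (W : Int) (H : Int)) (W : Int) (H : Int) y x)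

lemma pvH_get (data : List Int) (W H : Nat) (hW : 0 < W) (r x : Int)
    (hr0 : 0 ≤ r) (hrH : r < (H : Int)) (hx0 : 0 ≤ x) (hxW : x < (W : Int)) :
    PySem.List.pyGetD (pvH data (W : Int) (H : Int)) (r * (W : Int) + x) false
      = pvRowHit data (W : Int) r x := by
  rw [pvH_eq data W H]
  exact pvGridGet' (fun y x => pvRowHit data (W : Int) y x) W H hW r x hr0 hrH hx0 hxW false

lemma pvV_get (data : List Int) (W H : Nat) (hW : 0 < W) (r x : Int)
    (hr0 : 0 ≤ r) (hrH : r < (H : Int)) (hx0 : 0 ≤ x) (hxW : x < (W : Int)) :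
    PySem.List.pyGetD (pvV data (W : Int) (H : Int)) (r * (W : Int) + x) false
      = pvColHit (pvH data (W : Int) (H : Int)) (W : Int) (H : Int) r x := by
  rw [pvV_eq data W H]
  exact pvGridGet' (fun y x => pvColHit (pvH data (W : Int) (H : Int)) (W : Int) (H : Int) y x) W H hW r x hr0 hrH hx0 hxW false

lemma pvAnyIff (data : List Int) (W H : Nat) (hW : 0 < W) (y x : Int)
    (hy0 : 0 ≤ y) (hyH : y < (H : Int)) (hx0 : 0 ≤ x) (hxW : x < (W : Int))
    (hfree : 0 ≤ PySem.List.pyGetD data (y * (W : Int) + x) 0) :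
    (pvOffsets.any (pvHitB data (W : Int) (H : Int) x y) = true)
      ↔ (pvColHit (pvH data (W : Int) (H : Int)) (W : Int) (H : Int) y x = true) := by
  unfold pvColHit
  rw [List.any_eq_true, List.any_eq_true]
  constructor
  · rintro ⟨⟨dx, dy⟩, hmem, hhit⟩
    rw [mem_pvOffsets] at hmem
    simp only [pvHitB, Bool.and_eq_true, decide_eq_true_eq] at hhit
    obtain ⟨⟨hb1, hb2, hb3, hb4⟩, hval⟩ := hhit
    refine ⟨y + dy, ?_, ?_⟩
    · rw [PySem.List.mem_pyRange_one]; constructor <;> omega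
    · rw [pvH_get data W H hW (y + dy) x hb3 hb4 hx0 hxW]
      unfold pvRowHit
      rw [List.any_eq_true]
      refine ⟨x + dx, ?_, ?_⟩
      · rw [PySem.List.mem_pyRange_one]; constructor <;> omega
      · simp [hval]
  · rintro ⟨r, hr, hH⟩
    rw [PySem.List.mem_pyRange_one] at hr
    have hr0 : 0 ≤ r := by omega
    have hrH : r < (H : Int) := by omega
    rw [pvH_get data W H hW r x hr0 hrH hx0 hxW] at hH
    unfold pvRowHit at hH
    rw [List.any_eq_true] at hH
    obtain ⟨c, hc, hval⟩ := hH
    rw [PySem.List.mem_pyRange_one] at hc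
    simp only [beq_iff_eq] at hval
    refine ⟨(c - x, r - y), ?_, ?_⟩
    · rw [mem_pvOffsets]
      refine ⟨by omega, by omega, by omega, by omega, ?_⟩
      rintro ⟨h1, h2⟩
      have hcx : c = x := by omega
      have hry : r = y := by omega
      rw [hcx, hry] at hval
      rw [hval] at hfree
      omega
    · simp only [pvHitB, Bool.and_eq_true, decide_eq_true_eq]
      refine ⟨⟨by omega, by omega, by omega, by omega⟩, ?_⟩
      have e : (y + (r - y)) * (W : Int) + (x + (c - x)) = r * (W : Int) + c := by ring
      rw [e]
      exact hval

lemma pvPointwise (data : List Int) (W H : Nat) (hW : 0 < W) (ft : Int) (y x : Int)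
    (hy0 : 0 ≤ y) (hyH : y < (H : Int)) (hx0 : 0 ≤ x) (hxW : x < (W : Int)) :
    pvCondA data (W : Int) (H : Int) ft y x = pvCondB data (W : Int) (H : Int) ft (y * (W : Int) + x) := by
  by_cases hfree : 0 ≤ PySem.List.pyGetD data (y * (W : Int) + x) 0 ∧
      PySem.List.pyGetD data (y * (W : Int) + x) 0 < ft
  · have h1 : ¬(PySem.List.pyGetD data (y * (W : Int) + x) 0 < 0 ∨
        ft ≤ PySem.List.pyGetD data (y * (W : Int) + x) 0) := by omega
    have hkey := pvAnyIff data W H hW y x hy0 hyH hx0 hxW hfree.1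
    have hV := pvV_get data W H hW y x hy0 hyH hx0 hxW
    simp only [pvCondA, pvCondB, hV]
    rw [decide_eq_false h1]
    simp only [Bool.not_false, Bool.true_and]
    rw [Bool.eq_iff_iff, decide_eq_true_eq]
    constructor
    · intro hany; exact ⟨hfree.1, hfree.2, hkey.mp hany⟩
    · rintro ⟨_, _, hcol⟩; exact hkey.mpr hcol
  · have h1 : PySem.List.pyGetD data (y * (W : Int) + x) 0 < 0 ∨
        ft ≤ PySem.List.pyGetD data (y * (W : Int) + x) 0 := by omega
    have hV := pvV_get data W H hW y x hy0 hyH hx0 hxW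
    simp only [pvCondA, pvCondB, hV]
    rw [decide_eq_true h1]
    simp only [Bool.not_true, Bool.false_and]
    symm
    rw [decide_eq_false]
    rintro ⟨ha, hb, _⟩
    exact hfree ⟨ha, hb⟩

lemma pvFoldlId {σ : Type} (l : List Int) (s : σ) : l.foldl (fun s _ => s) s = s := by
  induction l generalizing s with
  | nil => rfl
  | cons a l ih => simp [List.foldl_cons, ih]

-- A's whole computation as a filtered range (positive grid)
lemma pvA_eq (data : List Int) (W H : Nat) (hW : 0 < W) (ft : Int) :
    build_frontier_mask_py data (W : Int) (H : Int) ft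
      = ((List.range (H * W)).filter
          (fun (k : Nat) => pvCondA data (W : Int) (H : Int) ft (↑(k / W)) (↑(k % W)))).map
          (fun (k : Nat) => (k : Int)) := by
  unfold build_frontier_mask_py
  have hfun : (fun (fr : PySem.Set Int) (y : Int) =>
      (PySem.List.pyRange 0 (W : Int) 1).foldl (fun fr2 x =>
        if PySem.List.pyGetD data (y * (W : Int) + x) 0 < 0 ∨
            ft ≤ PySem.List.pyGetD data (y * (W : Int) + x) 0 then fr2
        else pvScanA data (W : Int) (H : Int) x y (y * (W : Int) + x) pvOffsets fr2) fr)
      = (fun fr y => (PySem.List.pyRange 0 (W : Int) 1).foldl (fun fr2 x =>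
          if pvCondA data (W : Int) (H : Int) ft y x = true
          then PySem.Set.add fr2 (y * (W : Int) + x) else fr2) fr) := by
    funext fr y
    have hbody : (fun (fr2 : PySem.Set Int) (x : Int) =>
        if PySem.List.pyGetD data (y * (W : Int) + x) 0 < 0 ∨
            ft ≤ PySem.List.pyGetD data (y * (W : Int) + x) 0 then fr2
        else pvScanA data (W : Int) (H : Int) x y (y * (W : Int) + x) pvOffsets fr2)
        = (fun fr2 x => if pvCondA data (W : Int) (H : Int) ft y x = true
            then PySem.Set.add fr2 (y * (W : Int) + x) else fr2) := by
      funext fr2 x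
      rw [pvScanA_eq]
      by_cases h1 : PySem.List.pyGetD data (y * (W : Int) + x) 0 < 0 ∨
          ft ≤ PySem.List.pyGetD data (y * (W : Int) + x) 0
      · rw [if_pos h1]
        simp only [pvCondA, decide_eq_true h1, Bool.not_true, Bool.false_and, Bool.false_eq_true,
          if_false]
      · rw [if_neg h1]
        simp only [pvCondA, decide_eq_false h1, Bool.not_false, Bool.true_and]
    rw [hbody]
  rw [hfun, pvFoldlFoldl (fun s y x =>
    if pvCondA data (W : Int) (H : Int) ft y x = true
    then PySem.Set.add s (y * (W : Int) + x) else s)]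
  have hpairs : (PySem.List.pyRange 0 (H : Int) 1).flatMap
      (fun y => (PySem.List.pyRange 0 (W : Int) 1).map (fun x => (y, x)))
      = (List.range (H * W)).map (fun (k : Nat) => ((↑(k / W) : Int), (↑(k % W) : Int))) := by
    rw [PySem.List.pyRange_zero_natCast, PySem.List.pyRange_zero_natCast, List.flatMap_map]
    simp only [List.map_map]
    exact pvGridEq W H (fun y x => (y, x))
  rw [hpairs, List.foldl_map]
  have hg : ∀ k : Nat, ((↑(k / W) : Int), (↑(k % W) : Int)).1 * (W : Int)
      + ((↑(k / W) : Int), (↑(k % W) : Int)).2 = (k : Int) := by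
    intro k
    simp only []
    have h := Nat.div_add_mod k W
    rw [Nat.mul_comm] at h
    exact_mod_cast h
  rw [pvFoldlAddIf
    (fun (k : Nat) => ((↑(k / W) : Int), (↑(k % W) : Int)).1 * (W : Int) + ((↑(k / W) : Int), (↑(k % W) : Int)).2)
    (fun (k : Nat) => pvCondA data (W : Int) (H : Int) ft ((↑(k / W) : Int), (↑(k % W) : Int)).1 ((↑(k / W) : Int), (↑(k % W) : Int)).2)
    (List.range (H * W)) PySem.Set.empty (by simp [PySem.Set.empty])
    ((List.pairwise_lt_range).imp (fun {a b} hab => by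
      simp only [hg]; exact_mod_cast Nat.ne_of_lt hab))]
  simp only [PySem.Set.empty, List.nil_append]
  exact List.map_congr_left (fun k _ => hg k)

-- B's whole computation as a filtered range (positive grid)
lemma pvB_eq (data : List Int) (W H : Nat) (hW : 0 < W) (hH : 0 < H) (ft : Int) :
    build_frontier_mask_py_alt data (W : Int) (H : Int) ft
      = ((List.range (H * W)).filter
          (fun (k : Nat) => pvCondB data (W : Int) (H : Int) ft (k : Int))).map
          (fun (k : Nat) => (k : Int)) := by
  unfold build_frontier_mask_py_alt
  have hcond : (0 < (W : Int) ∧ 0 < (H : Int)) := by constructor <;> exact_mod_cast ‹_›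
  rw [if_pos hcond]
  have hn : (W : Int) * (H : Int) = ((H * W : Nat) : Int) := by push_cast; ring
  rw [hn, PySem.List.pyRange_zero_natCast, List.foldl_map]
  rw [pvFoldlAddIf'
    (fun (k : Nat) => (k : Int))
    (fun (k : Nat) => 0 ≤ PySem.List.pyGetD data (k : Int) 0 ∧
      PySem.List.pyGetD data (k : Int) 0 < ft ∧
      PySem.List.pyGetD (pvV data (W : Int) (H : Int)) (k : Int) false = true)
    (List.range (H * W)) PySem.Set.empty (by simp [PySem.Set.empty])
    ((List.pairwise_lt_range).imp (fun {a b} hab => by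
      simp only [ne_eq, Nat.cast_inj]; omega))]
  simp only [PySem.Set.empty, List.nil_append]
  rfl

-- ===== VERDICT (by name: the statement is the Claim_ definition above) =====
theorem build_frontier_mask_py_spec : Claim_equal_build_frontier_mask_py := by
  intro data w h_ ft _ _
  unfold Spec_build_frontier_mask_py
  by_cases hwh : 0 < w ∧ 0 < h_
  · obtain ⟨hw, hh⟩ := hwh
    obtain ⟨W, rfl⟩ : ∃ W : Nat, w = (W : Int) := ⟨w.toNat, (Int.toNat_of_nonneg hw.le).symm⟩
    obtain ⟨H, rfl⟩ : ∃ H : Nat, h_ = (H : Int) := ⟨h_.toNat, (Int.toNat_of_nonneg hh.le).symm⟩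
    have hW : 0 < W := by exact_mod_cast hw
    have hH : 0 < H := by exact_mod_cast hh
    rw [pvA_eq data W H hW ft, pvB_eq data W H hW hH ft]
    apply congrArg
    apply List.filter_congr
    intro k hk
    rw [List.mem_range] at hk
    have hy0 : (0 : Int) ≤ ↑(k / W) := by positivity
    have hyH : (↑(k / W) : Int) < (H : Int) := by
      have : k / W < H := Nat.div_lt_iff_lt_mul hW |>.mpr hk
      exact_mod_cast this
    have hx0 : (0 : Int) ≤ ↑(k % W) := by positivity
    have hxW : (↑(k % W) : Int) < (W : Int) := by
      have : k % W < W := Nat.mod_lt _ hW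
      exact_mod_cast this
    have hp := pvPointwise data W H hW ft (↑(k / W)) (↑(k % W)) hy0 hyH hx0 hxW
    have hkk : ((↑(k / W) : Int)) * (W : Int) + (↑(k % W) : Int) = (k : Int) := by
      have h := Nat.div_add_mod k W
      rw [Nat.mul_comm] at h
      exact_mod_cast h
    rw [hkk] at hp
    exact hp
  · have hA : build_frontier_mask_py data w h_ ft = [] := by
      unfold build_frontier_mask_py
      rcases not_and_or.mp hwh with hcw | hch
      · have hwr : PySem.List.pyRange 0 w 1 = [] := PySem.List.pyRange_one_eq_nil (by omega)
        rw [hwr]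
        simp only [List.foldl_nil]
        exact pvFoldlId _ _
      · have hhr : PySem.List.pyRange 0 h_ 1 = [] := PySem.List.pyRange_one_eq_nil (by omega)
        rw [hhr]
        rfl
    have hB : build_frontier_mask_py_alt data w h_ ft = [] := by
      unfold build_frontier_mask_py_alt
      rw [if_neg hwh]
      rfl
    rw [hA, hB]
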